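-- pv_equiv track=rewrite | github.com/open-cu/code-cheating | course/1/subject_python/H/40501-39199.py | is_padable_to_palindrome
-- ===== SOURCE A (Python) =====
-- def is_palindrom(s):
--     left_ptr = 0
--     right_ptr = len(s) - 1
--
--     while left_ptr <= right_ptr:
--         if s[left_ptr] != s[right_ptr]:
--             return False
--         left_ptr += 1
--         right_ptr -= 1
--
--     return True
--
-- def is_padable_to_palindrome(s):
--     left_ptr = -1
--     right_ptr = len(s)
--
--     for i, char in enumerate(s):
--         if s[i] != "a" and left_ptr == -1:
--             left_ptr = i
--         if s[i] != "a":
--             right_ptr = i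
--
--     if left_ptr == -1:
--         return True
--     else:
--         is_mid_sub_str_palindrom = is_palindrom(s[left_ptr:right_ptr + 1])
--         right_a_count = len(s) - 1 - right_ptr
--         left_a_count = left_ptr
--
--         if not is_mid_sub_str_palindrom:
--             return False
--         return left_a_count <= right_a_count
-- ===== SOURCE B (Python) =====
-- def is_padable_to_palindrome(s):
--     # Brute force: try every amount d of left 'a'-padding (the minimal working pad is
--     # at most len(s)).  Prune: a palindrome "a"*d + s must end in d 'a's, so once
--     # s[-d] != 'a' no pad of size >= d can work.
--     for d in range(len(s) + 1):
--         if d > 0 and s[-d] != "a":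
--             return False
--         t = "a" * d + s
--         if t == t[::-1]:
--             return True
--     return False
-- ===== Notes on version B (the rewrite author's own statement) =====
-- stated objective: alternative
-- what changed: Replaces A's single-pass index scan for the first/last non-'a' position plus a hand-written two-pointer palindrome check on the stripped middle by a brute-force search that tries each left 'a'-padding amount d = 0..len(s) in turn, reverse-comparing the padded string, with the pruning rule that a palindrome 'a'*d + s must end in d 'a's; O(n) analysis traded for a direct search that mirrors the problem statement (worst case O(n^2)).
import Mathlib
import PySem

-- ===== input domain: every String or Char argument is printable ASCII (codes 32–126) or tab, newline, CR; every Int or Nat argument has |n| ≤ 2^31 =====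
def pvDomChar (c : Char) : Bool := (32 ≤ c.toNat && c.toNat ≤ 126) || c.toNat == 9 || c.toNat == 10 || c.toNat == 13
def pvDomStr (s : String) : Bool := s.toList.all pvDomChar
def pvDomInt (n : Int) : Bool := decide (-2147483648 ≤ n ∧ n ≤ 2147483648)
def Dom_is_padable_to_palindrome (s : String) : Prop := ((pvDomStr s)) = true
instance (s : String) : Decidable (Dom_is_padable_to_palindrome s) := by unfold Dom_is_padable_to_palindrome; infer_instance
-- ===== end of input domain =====

-- B replaces A's index scan + two-pointer palindrome loop by a brute-force search over
-- every left 'a'-padding amount, reverse-comparing each padded string (objective: alternative).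


-- ===== PORT A =====
-- while left_ptr <= right_ptr: compare s[left_ptr] with s[right_ptr].  The index reads are
-- PySem.List.pyGet?; for the pointers is_palindrom passes they are always in range, so the
-- `none` (IndexError) branch is unreachable.
def palLoop (l : List Char) (lp rp : Int) : Bool :=
  if lp ≤ rp then
    match PySem.List.pyGet? l lp, PySem.List.pyGet? l rp with
    | some a, some b => if a ≠ b then false else palLoop l (lp + 1) (rp - 1)
    | _, _ => false
  else true
termination_by (rp + 1 - lp).toNat
decreasing_by omega

def is_palindrom (s : List Char) : Bool := palLoop s 0 ((s.length : Int) - 1)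

def is_padable_to_palindrome (s : String) : Bool :=
  let l := s.toList
  -- for i, char in enumerate(s): the two ifs update left_ptr and right_ptr (s[i] is char)
  let st := (PySem.List.enumerate l 0).foldl
    (fun (st : Int × Int) ic =>
      let lp := if ic.2 ≠ 'a' ∧ st.1 = -1 then ic.1 else st.1
      let rp := if ic.2 ≠ 'a' then ic.1 else st.2
      (lp, rp))
    (-1, (l.length : Int))
  if st.1 = -1 then true
  else
    let sub := PySem.List.slice l (some st.1) (some (st.2 + 1))   -- s[left_ptr:right_ptr+1]
    let is_mid := is_palindrom sub
    let right_a := (l.length : Int) - 1 - st.2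
    let left_a := st.1
    if ¬ is_mid then false else decide (left_a ≤ right_a)

-- ===== PORT B =====
-- for d in range(len(s)+1): if d > 0 and s[-d] != "a": return False; t = "a"*d + s;
-- if t == t[::-1]: return True  — the for loop is the counting recursion altLoop (d runs
-- 0..len(s), falling off the range returns False); s[-d] is PySem.List.pyGet? l (-d)
-- (in range for 1 ≤ d ≤ len(s), which the loop guarantees); t[::-1] is t.reverse
-- (PySem.List.slice?_none_none_neg_one).
def altLoop (l : List Char) (d : Nat) : Bool :=
  if _h : d ≤ l.length then
    if d > 0 && !(PySem.List.pyGet? l (-(d : Int)) == some 'a') then false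
    else
      let t := List.replicate d 'a' ++ l
      if t == t.reverse then true
      else altLoop l (d + 1)
  else false
termination_by l.length + 1 - d
decreasing_by omega

def is_padable_to_palindrome_alt (s : String) : Bool := altLoop s.toList 0

-- ===== PRECONDITION & SPEC =====
def Spec_is_padable_to_palindrome (s : String) (out : Bool) : Prop := out = is_padable_to_palindrome_alt s
instance (s : String) (out : Bool) : Decidable (Spec_is_padable_to_palindrome s out) := by unfold Spec_is_padable_to_palindrome; infer_instance

-- ===== CLAIM (what is proved, stated in full; the proofs are below) =====
def Claim_equal_is_padable_to_palindrome : Prop := ∀ (s : String), Dom_is_padable_to_palindrome s → Spec_is_padable_to_palindrome s (is_padable_to_palindrome s)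

-- ===== LEMMAS AND PROOFS =====

lemma dropWhile_eq_drop (p : Char → Bool) (l : List Char) :
    l.dropWhile p = l.drop (l.takeWhile p).length := by
  induction l with
  | nil => rfl
  | cons c t ih => by_cases h : p c <;> simp [h, ih]

lemma contains_a (c : Char) : (['a'].contains c) = (c == 'a') := by
  rcases eq_or_ne c 'a' with h | h <;> simp [h]

lemma strip_eq_nil_iff (l : List Char) :
    (PySem.Chars.stripChars l ['a'] = []) ↔ l.all (· == 'a') := by
  simp only [PySem.Chars.stripChars, contains_a]
  rw [List.reverse_eq_nil_iff, List.dropWhile_eq_nil_iff]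
  simp only [List.mem_reverse, List.all_eq_true]
  constructor
  · intro h x hx
    rcases List.mem_append.1 (by rw [List.takeWhile_append_dropWhile (p := fun c => c == 'a') (l := l)]; exact hx) with h1 | h2
    · exact List.mem_takeWhile_imp (p := fun c => c == 'a') h1
    · exact h x h2
  · intro h x hx
    exact h x ((List.dropWhile_sublist _).mem hx)

lemma takeWhile_nil_of_head (p : Char → Bool) (l : List Char) (c : Char)
    (h : l.head? = some c) (hc : p c = false) : l.takeWhile p = [] := by
  cases l with
  | nil => rfl
  | cons x t => simp at h; subst h; simp [hc]

lemma takeWhile_rev_eq (l : List Char) (h : ¬ l.all (· == 'a') = true) :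
    l.reverse.takeWhile (· == 'a') = (l.dropWhile (· == 'a')).reverse.takeWhile (· == 'a') := by
  set p : Char → Bool := fun c => c == 'a' with hp
  have hdne : l.dropWhile p ≠ [] := by
    intro hnil
    exact h (by simpa [List.all_eq_true] using (List.dropWhile_eq_nil_iff.1 hnil))
  have hnotall : ¬ ((l.dropWhile p).reverse.takeWhile p).length = (l.dropWhile p).reverse.length := by
    intro heq
    have hall : ∀ x ∈ (l.dropWhile p).reverse, p x = true := by
      rw [← List.takeWhile_eq_self_iff]
      exact (List.takeWhile_sublist _).eq_of_length heq
    rcases List.exists_cons_of_ne_nil hdne with ⟨c, t, hct⟩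
    have hc : p c = false := by
      have := List.head?_dropWhile_not p l
      rw [hct] at this
      simpa using this
    have : p c = true := hall c (by simp [hct])
    simp [hc] at this
  have hrev : l.reverse = (l.dropWhile p).reverse ++ (l.takeWhile p).reverse := by
    rw [← List.reverse_append, List.takeWhile_append_dropWhile]
  rw [hrev, List.takeWhile_append, if_neg hnotall]

lemma strip_eq_drop_take (l : List Char) (h : ¬ l.all (· == 'a') = true) :
    PySem.Chars.stripChars l ['a'] =
      (l.drop (l.takeWhile (· == 'a')).length).take
        (l.length - (l.reverse.takeWhile (· == 'a')).length - (l.takeWhile (· == 'a')).length) := by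
  simp only [PySem.Chars.stripChars, contains_a]
  set p : Char → Bool := fun c => c == 'a' with hp
  set k := (l.takeWhile p).length with hk
  set m := (l.reverse.takeWhile p).length with hm
  have hd : l.dropWhile p = l.drop k := dropWhile_eq_drop p l
  have hm2 : ((l.dropWhile p).reverse.takeWhile p).length = m := by
    rw [hm, takeWhile_rev_eq l h]
  rw [dropWhile_eq_drop p (l.dropWhile p).reverse, hm2, List.drop_reverse, List.reverse_reverse]
  rw [hd]
  simp only [List.length_drop]
  congr 1
  omega

lemma takeWhile_rev_cons_of_not_all (c : Char) (t : List Char) (ht : ¬ t.all (· == 'a') = true) :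
    (c :: t).reverse.takeWhile (· == 'a') = t.reverse.takeWhile (· == 'a') := by
  rw [List.reverse_cons, List.takeWhile_append, if_neg]
  intro heq
  have h2 : ∀ x ∈ t.reverse, (x == 'a') = true :=
    List.takeWhile_eq_self_iff.1 ((List.takeWhile_sublist _).eq_of_length heq)
  exact ht (List.all_eq_true.2 fun x hx => h2 x (List.mem_reverse.2 hx))

lemma takeWhile_rev_cons_of_all (c : Char) (t : List Char) (hc : ¬ c = 'a')
    (ht : t.all (· == 'a') = true) :
    (c :: t).reverse.takeWhile (· == 'a') = t.reverse := by
  rw [List.reverse_cons, List.takeWhile_append]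
  have hself : t.reverse.takeWhile (· == 'a') = t.reverse :=
    List.takeWhile_eq_self_iff.2 (by
      intro x hx
      exact List.all_eq_true.1 ht x (List.mem_reverse.1 hx))
  rw [if_pos (by rw [hself])]
  simp [hc]

lemma fold_char (l : List Char) (j lp rp : Int) (hj : 0 ≤ j) :
    (PySem.List.enumerate l j).foldl
      (fun (st : Int × Int) ic =>
        let lp := if ic.2 ≠ 'a' ∧ st.1 = -1 then ic.1 else st.1
        let rp := if ic.2 ≠ 'a' then ic.1 else st.2
        (lp, rp)) (lp, rp) =
    (if l.all (· == 'a') then (lp, rp)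
    else ((if lp = -1 then j + ((l.takeWhile (· == 'a')).length : Int) else lp),
          j + ((l.length : Int) - 1 - ((l.reverse.takeWhile (· == 'a')).length : Int)))) := by
  induction l generalizing j lp rp with
  | nil => simp [PySem.List.enumerate_nil]
  | cons c t ih =>
    rw [PySem.List.enumerate_cons, List.foldl_cons]
    by_cases hc : c = 'a'
    · simp only [hc, ne_eq, not_true_eq_false, false_and, if_false]
      rw [ih (j + 1) lp rp (by omega)]
      by_cases hta : t.all (· == 'a') = true
      · have h2 : (('a' :: t).all (· == 'a')) = true := by simp [hta]
        rw [if_pos hta, if_pos h2]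
      · have h2 : ¬ (('a' :: t).all (· == 'a')) = true := by simp [hta]
        rw [if_neg hta, if_neg h2, takeWhile_rev_cons_of_not_all 'a' t hta]
        refine Prod.ext ?_ ?_
        · simp only [List.takeWhile_cons, beq_self_eq_true, if_true,
            List.length_cons]
          rcases eq_or_ne lp (-1) with h | h
          · simp only [h, if_true]; push_cast; ring
          · simp only [if_neg h]
        · simp only [List.length_cons]
          push_cast
          ring
    · have hla : ¬ (c :: t).all (· == 'a') = true := by simp [hc]
      simp only [ne_eq, hc, not_false_iff, true_and, if_true]
      rw [ih (j + 1) (if lp = -1 then j else lp) j (by omega)]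
      have hlp' : ¬ (if lp = -1 then j else lp) = -1 := by
        rcases eq_or_ne lp (-1) with h | h
        · simp only [h, if_true]; omega
        · simp only [if_neg h]; exact h
      have hktw : List.takeWhile (· == 'a') (c :: t) = [] := by
        simp [hc]
      by_cases hta : t.all (· == 'a') = true
      · rw [if_pos hta, if_neg hla, takeWhile_rev_cons_of_all c t hc hta, hktw]
        refine Prod.ext ?_ ?_
        · simp
        · simp only [List.length_cons, List.length_reverse]
          push_cast
          ring
      · rw [if_neg hta, if_neg hla, takeWhile_rev_cons_of_not_all c t hta,
            if_neg hlp', hktw]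
        refine Prod.ext ?_ ?_
        · simp
        · simp only [List.length_cons]
          push_cast
          ring

lemma pyGet_nat (l : List Char) (i : Nat) (h : i < l.length) :
    PySem.List.pyGet? l (i : Int) = some l[i] := by
  simp [PySem.List.pyGet?, PySem.List.pyIdx?, h]

lemma pal_prop (a b : Char) (m : List Char) :
    (a :: (m ++ [b]) = (a :: (m ++ [b])).reverse) ↔ (a = b ∧ m = m.reverse) := by
  rw [List.reverse_cons, List.reverse_append, List.reverse_singleton,
    List.singleton_append, List.cons_append, List.cons.injEq]
  constructor
  · rintro ⟨hab, h⟩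
    refine ⟨hab, ?_⟩
    rw [hab] at h
    exact (List.append_left_inj [b]).1 h
  · rintro ⟨hab, h⟩
    refine ⟨hab, ?_⟩
    rw [hab]
    exact congrArg (· ++ [b]) h

lemma pal_cons_concat (a b : Char) (m : List Char) :
    ((a :: (m ++ [b])) == (a :: (m ++ [b])).reverse) = ((a == b) && (m == m.reverse)) := by
  apply Bool.eq_iff_iff.2
  simp only [beq_iff_eq, Bool.and_eq_true]
  exact pal_prop a b m

lemma pal_loop_eq_aux (l : List Char) :
    ∀ (d i j : Nat), j + 1 - i ≤ d → j < l.length →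
    palLoop l (i : Int) (j : Int) =
      (((l.take (j + 1)).drop i) == ((l.take (j + 1)).drop i).reverse) := by
  intro d
  induction d with
  | zero =>
    intro i j hd hj
    have hseg : (l.take (j + 1)).drop i = [] := by
      apply List.drop_eq_nil_of_le
      simpa using by omega
    rw [palLoop, if_neg (by omega), hseg]
    simp
  | succ d ihd =>
    intro i j hd hj
    by_cases hij : i ≤ j
    · rw [palLoop, if_pos (by omega),
        pyGet_nat l i (by omega), pyGet_nat l j hj]
      rcases eq_or_ne i j with rfl | hne
      · have hseg : (l.take (i + 1)).drop i = [l[i]] := by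
          rw [List.take_add_one, List.getElem?_eq_getElem hj, Option.toList_some,
            List.drop_left' (by simp [List.length_take]; omega)]
        rw [hseg]
        have hrec : palLoop l ((i : Int) + 1) ((i : Int) - 1) = true := by
          rw [palLoop, if_neg (by omega)]
        simp [hrec]
      · have hjtake : i < (l.take j).length := by simp; omega
        have hseg : (l.take (j + 1)).drop i =
            l[i] :: (((l.take j).drop (i + 1)) ++ [l[j]]) := by
          rw [List.take_add_one, List.getElem?_eq_getElem hj, Option.toList_some,
            List.drop_append_of_le_length (by simp; omega),
            List.drop_eq_getElem_cons hjtake]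
          simp [List.getElem_take]
        have hrec := ihd (i + 1) (j - 1) (by omega) (by omega)
        have hc1 : ((i : Int) + 1) = ((i + 1 : Nat) : Int) := by push_cast; ring
        have hc2 : ((j : Int) - 1) = ((j - 1 : Nat) : Int) := by push_cast [Nat.cast_sub (by omega : 1 ≤ j)]; ring
        rw [hc1, hc2, hrec]
        have hj1 : j - 1 + 1 = j := by omega
        rw [hj1, hseg, pal_cons_concat]
        by_cases heq : l[i] = l[j] <;> simp [heq]
    · have hseg : (l.take (j + 1)).drop i = [] := by
        apply List.drop_eq_nil_of_le
        simpa using by omega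
      rw [palLoop, if_neg (by omega), hseg]
      simp

-- A's value in closed form: true on all-'a' strings, else "middle palindromic and
-- leading-'a' count ≤ trailing-'a' count".
lemma charA (s : String) :
    is_padable_to_palindrome s =
      (if s.toList.all (· == 'a') then true
       else ((PySem.Chars.stripChars s.toList ['a'] == (PySem.Chars.stripChars s.toList ['a']).reverse)
             && decide ((s.toList.takeWhile (· == 'a')).length ≤ (s.toList.reverse.takeWhile (· == 'a')).length))) := by
  simp only [is_padable_to_palindrome]
  set l := s.toList with hl
  rw [fold_char l 0 (-1) (l.length : Int) le_rfl]
  by_cases hall : l.all (· == 'a') = true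
  · rw [if_pos hall, if_pos hall]
    simp
  · rw [if_neg hall, if_neg hall]
    set k := (l.takeWhile (· == 'a')).length with hk
    set m := (l.reverse.takeWhile (· == 'a')).length with hm
    set mid := PySem.Chars.stripChars l ['a'] with hmid
    have hmidne : mid ≠ [] := fun h => hall ((strip_eq_nil_iff l).1 h)
    have hmn : m ≤ l.length := by
      have := (List.takeWhile_prefix (l := l.reverse) (· == 'a')).length_le
      simpa using this
    have hfst : (if (-1 : Int) = -1 then (0 : Int) + (k : Int) else -1) = (k : Int) := by simp
    rw [hfst, if_neg (by omega : ¬ (k : Int) = -1)]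
    have hmleft : k ≤ l.length - m := by
      have h1 := strip_eq_drop_take l hall
      by_cases h : k ≤ l.length - m
      · exact h
      · exfalso
        rw [Nat.not_le] at h
        apply hmidne
        rw [hmid, h1, ← hk, ← hm]
        have : l.length - m - k = 0 := by omega
        rw [this]
        simp
    have hsub : PySem.List.slice l (some (k : Int)) (some ((0 : Int) + ((l.length : Int) - 1 - (m : Int)) + 1)) = mid := by
      have hb : (0 : Int) + ((l.length : Int) - 1 - (m : Int)) + 1 = ((l.length - m : Nat) : Int) := by
        push_cast [Nat.cast_sub hmn]
        ring
      rw [hb, PySem.List.slice_toNat l (by omega) (by omega)]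
      simp only [Int.toNat_natCast]
      rw [hmid, strip_eq_drop_take l hall, ← hk, ← hm]
    rw [hsub]
    have hpal : is_palindrom mid = (mid == mid.reverse) := by
      have hlen : 1 ≤ mid.length := List.length_pos_of_ne_nil hmidne
      have hc : ((mid.length : Int) - 1) = ((mid.length - 1 : Nat) : Int) := by
        push_cast [Nat.cast_sub hlen]; ring
      have h := pal_loop_eq_aux mid mid.length 0 (mid.length - 1) (by omega) (by omega)
      rw [List.take_of_length_le (by omega), List.drop_zero] at h
      rw [is_palindrom, hc]
      exact_mod_cast h
    have hcmp : ((l.length : Int) - 1 - ((0 : Int) + ((l.length : Int) - 1 - (m : Int)))) = (m : Int) := by ring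
    rw [hcmp, hpal]
    have hdec : (decide ((k : Int) ≤ (m : Int))) = decide (k ≤ m) := by
      by_cases h : k ≤ m
      · simp [h, (by exact_mod_cast h : (k : Int) ≤ (m : Int))]
      · simp [h, (by exact_mod_cast h : ¬ (k : Int) ≤ (m : Int))]
    rw [hdec]
    cases mid == mid.reverse <;> simp

-- the strip decomposition l = 'a'^k ++ mid ++ 'a'^m  (non-all-'a' strings)
lemma decomp (l : List Char) (h : ¬ l.all (· == 'a') = true) :
    l = List.replicate (l.takeWhile (· == 'a')).length 'a'
        ++ PySem.Chars.stripChars l ['a']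
        ++ List.replicate (l.reverse.takeWhile (· == 'a')).length 'a' := by
  set p : Char → Bool := fun c => c == 'a' with hp
  have htk : l.takeWhile p = List.replicate (l.takeWhile p).length 'a' :=
    List.eq_replicate_of_mem (fun b hb => by simpa [hp] using List.mem_takeWhile_imp hb)
  have hYtk : (l.dropWhile p).reverse.takeWhile p
      = List.replicate (l.reverse.takeWhile p).length 'a' := by
    rw [takeWhile_rev_eq l h]
    exact List.eq_replicate_of_mem (fun b hb => by simpa [hp] using List.mem_takeWhile_imp hb)
  have hmid : PySem.Chars.stripChars l ['a']
      = ((l.dropWhile p).reverse.dropWhile p).reverse := by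
    simp only [PySem.Chars.stripChars, contains_a]
    rfl
  conv_lhs => rw [← List.takeWhile_append_dropWhile (p := p) (l := l)]
  have hdp : l.dropWhile p = PySem.Chars.stripChars l ['a']
      ++ List.replicate (l.reverse.takeWhile p).length 'a' := by
    conv_lhs => rw [← List.reverse_reverse (l.dropWhile p),
      ← List.takeWhile_append_dropWhile (p := p) (l := (l.dropWhile p).reverse)]
    rw [List.reverse_append, hmid, hYtk, List.reverse_replicate]
  rw [hdp]
  conv_lhs => rw [htk]
  rw [List.append_assoc]

-- both ends of the stripped middle are non-'a': its takeWhile (from either side) is empty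
lemma mid_rev_takeWhile_nil (l : List Char) :
    (PySem.Chars.stripChars l ['a']).reverse.takeWhile (· == 'a') = [] := by
  set p : Char → Bool := fun c => c == 'a' with hp
  have hmid : PySem.Chars.stripChars l ['a']
      = ((l.dropWhile p).reverse.dropWhile p).reverse := by
    simp only [PySem.Chars.stripChars, contains_a]
    rfl
  rw [hmid, List.reverse_reverse]
  set Y := (l.dropWhile p).reverse with hY
  cases hc : (Y.dropWhile p).head? with
  | none =>
    have : Y.dropWhile p = [] := by
      cases hx : Y.dropWhile p with
      | nil => rfl
      | cons a t => rw [hx] at hc; simp at hc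
    rw [this]
    rfl
  | some c =>
    refine takeWhile_nil_of_head p _ c hc ?_
    have := List.head?_dropWhile_not p Y
    rw [hc] at this
    simpa using this

lemma mid_takeWhile_nil (l : List Char) (h : ¬ l.all (· == 'a') = true) :
    (PySem.Chars.stripChars l ['a']).takeWhile (· == 'a') = [] := by
  set p : Char → Bool := fun c => c == 'a' with hp
  set mid := PySem.Chars.stripChars l ['a'] with hmiddef
  have hmidne : mid ≠ [] := fun hnil => h ((strip_eq_nil_iff l).1 hnil)
  have hmid : mid = ((l.dropWhile p).reverse.dropWhile p).reverse := by
    simp only [hmiddef, PySem.Chars.stripChars, contains_a]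
    rfl
  set Y := (l.dropWhile p).reverse with hY
  have hXne : Y.dropWhile p ≠ [] := by
    intro hnil
    apply hmidne
    rw [hmid, hnil]
    rfl
  have hdne : l.dropWhile p ≠ [] := by
    intro hnil
    exact h (by simpa [List.all_eq_true] using (List.dropWhile_eq_nil_iff.1 hnil))
  -- head of mid = last of Y.dropWhile p = last of Y = head of l.dropWhile p, which is non-'a'
  have h1 : mid.head? = (Y.dropWhile p).getLast? := by
    rw [hmid, List.head?_reverse]
  have h2 : (Y.dropWhile p).getLast? = Y.getLast? := by
    conv_rhs => rw [← List.takeWhile_append_dropWhile (p := p) (l := Y)]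
    rw [List.getLast?_append_of_ne_nil _ hXne]
  have h3 : Y.getLast? = (l.dropWhile p).head? := by
    rw [hY, List.getLast?_reverse]
  cases hc : (l.dropWhile p).head? with
  | none =>
    exfalso
    apply hdne
    cases hx : l.dropWhile p with
    | nil => rfl
    | cons a t => rw [hx] at hc; simp at hc
  | some c =>
    have hch : mid.head? = some c := by rw [h1, h2, h3, hc]
    refine takeWhile_nil_of_head p _ c hch ?_
    have := List.head?_dropWhile_not p l
    rw [hc] at this
    simpa using this

-- takeWhile over 'a'^j ++ r where r starts with a non-'a' (r.takeWhile = [] and r ≠ [])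
lemma takeWhile_rep_append (j : Nat) (r : List Char) (hr : r.takeWhile (· == 'a') = []) :
    (List.replicate j 'a' ++ r).takeWhile (· == 'a') = List.replicate j 'a' := by
  rw [List.takeWhile_append]
  have hrep : (List.replicate j 'a').takeWhile (· == 'a') = List.replicate j 'a' :=
    List.takeWhile_eq_self_iff.2 (fun x hx => by
      have := List.eq_of_mem_replicate hx
      simp [this])
  rw [if_pos (by rw [hrep]), hr, List.append_nil]

-- indexing s[-d] for 1 ≤ d ≤ len(s)
lemma pyGet_neg (l : List Char) (d : Nat) (h1 : 1 ≤ d) (h2 : d ≤ l.length) :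
    PySem.List.pyGet? l (-(d : Int)) = some (l[l.length - d]'(by omega)) := by
  simp only [PySem.List.pyGet?, PySem.List.pyIdx?]
  rw [if_neg (by omega), if_pos (by omega)]
  simp only [neg_neg, Int.toNat_natCast, Option.bind_some]
  exact List.getElem?_eq_getElem (by omega)

-- a palindrome 'a'^e ++ l ends (hence l ends) in e 'a's
lemma pal_suffix (l : List Char) (e : Nat) (he : e ≤ l.length)
    (h : List.replicate e 'a' ++ l = (List.replicate e 'a' ++ l).reverse) :
    l.reverse.take e = List.replicate e 'a' := by
  rw [List.reverse_append, List.reverse_replicate] at h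
  have h1 : (List.replicate e 'a' ++ l).take e = List.replicate e 'a' := by
    simp
  have h2 : (l.reverse ++ List.replicate e 'a').take e = l.reverse.take e :=
    List.take_append_of_le_length (by simpa using he)
  rw [← h2, ← h, h1]

lemma pal_last_a (l : List Char) (e d : Nat) (hd1 : 1 ≤ d) (hde : d ≤ e) (he : e ≤ l.length)
    (h : List.replicate e 'a' ++ l = (List.replicate e 'a' ++ l).reverse) :
    l[l.length - d]'(by omega) = 'a' := by
  have hs := pal_suffix l e he h
  have hrl : d - 1 < l.reverse.length := by simp; omega
  have h1 : l.reverse[d - 1]'hrl = 'a' := by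
    have ht : (l.reverse.take e)[d - 1]'(by rw [hs]; simp; omega) = l.reverse[d - 1]'hrl :=
      List.getElem_take
    rw [← ht]
    simp only [hs, List.getElem_replicate]
  rw [List.getElem_reverse] at h1
  have h2 : l[l.length - d]? = some 'a' := by
    rw [show l.length - d = l.length - 1 - (d - 1) from by omega,
      List.getElem?_eq_getElem (by omega)]
    exact congrArg some h1
  exact Option.some.inj (((List.getElem?_eq_getElem (by omega)).symm).trans h2)

-- the pruned search over pads finds a pad iff one exists at all
lemma altLoop_true_iff (l : List Char) : ∀ (fuel d : Nat), l.length + 1 - d ≤ fuel →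
    (altLoop l d = true ↔ ∃ e, d ≤ e ∧ e ≤ l.length ∧
      List.replicate e 'a' ++ l = (List.replicate e 'a' ++ l).reverse) := by
  intro fuel
  induction fuel with
  | zero =>
    intro d hf
    rw [altLoop, dif_neg (by omega)]
    constructor
    · intro h; exact absurd h (by simp)
    · rintro ⟨e, h1, h2, _⟩; omega
  | succ fuel ih =>
    intro d hf
    rw [altLoop]
    by_cases hdn : d ≤ l.length
    · rw [dif_pos hdn]
      by_cases hprune : (d > 0 && !(PySem.List.pyGet? l (-(d : Int)) == some 'a')) = true
      · rw [if_pos hprune]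
        simp only [Bool.and_eq_true, decide_eq_true_eq, Bool.not_eq_true', beq_eq_false_iff_ne,
          ne_eq] at hprune
        obtain ⟨hd0, hne⟩ := hprune
        constructor
        · intro h; exact absurd h (by simp)
        · rintro ⟨e, h1, h2, hpal⟩
          exfalso
          apply hne
          rw [pyGet_neg l d hd0 (by omega), pal_last_a l e d hd0 h1 h2 hpal]
      · rw [if_neg hprune]
        by_cases hpal : ((List.replicate d 'a' ++ l) == (List.replicate d 'a' ++ l).reverse) = true
        · rw [if_pos hpal]
          constructor
          · intro _; exact ⟨d, le_rfl, hdn, beq_iff_eq.1 hpal⟩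
          · intro _; rfl
        · rw [if_neg hpal]
          rw [ih (d + 1) (by omega)]
          constructor
          · rintro ⟨e, h1, h2, h3⟩; exact ⟨e, by omega, h2, h3⟩
          · rintro ⟨e, h1, h2, h3⟩
            refine ⟨e, ?_, h2, h3⟩
            rcases Nat.eq_or_lt_of_le h1 with rfl | h
            · exact absurd (beq_iff_eq.2 h3) hpal
            · omega
    · rw [dif_neg hdn]
      constructor
      · intro h; exact absurd h (by simp)
      · rintro ⟨e, h1, h2, _⟩; omega

-- B's value in the same closed form
lemma charB (s : String) :
    is_padable_to_palindrome_alt s =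
      (if s.toList.all (· == 'a') then true
       else ((PySem.Chars.stripChars s.toList ['a'] == (PySem.Chars.stripChars s.toList ['a']).reverse)
             && decide ((s.toList.takeWhile (· == 'a')).length ≤ (s.toList.reverse.takeWhile (· == 'a')).length))) := by
  simp only [is_padable_to_palindrome_alt]
  set l := s.toList with hl
  set p : Char → Bool := fun c => c == 'a' with hp
  set k := (l.takeWhile (· == 'a')).length with hk
  set m := (l.reverse.takeWhile (· == 'a')).length with hm
  set mid := PySem.Chars.stripChars l ['a'] with hmiddef
  have hexists : (altLoop l 0 = true) ↔ ∃ e : Nat, e ≤ l.length ∧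
      (List.replicate e 'a' ++ l) = (List.replicate e 'a' ++ l).reverse := by
    rw [altLoop_true_iff l (l.length + 1) 0 (by omega)]
    constructor
    · rintro ⟨e, _, h2, h3⟩; exact ⟨e, h2, h3⟩
    · rintro ⟨e, h2, h3⟩; exact ⟨e, Nat.zero_le _, h2, h3⟩
  by_cases hall : l.all (· == 'a') = true
  · rw [if_pos hall]
    have hrep : l = List.replicate l.length 'a' :=
      List.eq_replicate_of_mem (fun b hb => by
        have := List.all_eq_true.1 hall b hb
        simpa using this)
    have h0 : l.reverse = l := by
      conv_lhs => rw [hrep]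
      rw [List.reverse_replicate, ← hrep]
    exact hexists.2 ⟨0, Nat.zero_le _, by simpa using h0.symm⟩
  · rw [if_neg hall]
    have hmidne : mid ≠ [] := fun hnil => hall ((strip_eq_nil_iff l).1 hnil)
    have hdecomp := decomp l hall
    rw [← hk, ← hm, ← hmiddef] at hdecomp
    have hmtw : mid.takeWhile p = [] := mid_takeWhile_nil l hall
    have hmrtw : mid.reverse.takeWhile p = [] := mid_rev_takeWhile_nil l
    have hmrne : mid.reverse ≠ [] := by simpa using hmidne
    have hmn : m ≤ l.length := by
      have := (List.takeWhile_prefix (l := l.reverse) (· == 'a')).length_le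
      simpa [hm] using this
    -- the padded string for pad e, decomposed
    have hT : ∀ e : Nat, List.replicate e 'a' ++ l
        = List.replicate (e + k) 'a' ++ mid ++ List.replicate m 'a' := by
      intro e
      conv_lhs => rw [hdecomp]
      rw [← List.append_assoc, ← List.append_assoc, ← List.replicate_add]
    have hTrev : ∀ e : Nat, (List.replicate e 'a' ++ l).reverse
        = List.replicate m 'a' ++ mid.reverse ++ List.replicate (e + k) 'a' := by
      intro e
      rw [hT e]
      simp [List.reverse_append, List.reverse_replicate, List.append_assoc]
    -- forward: any pad works → mid palindrome and k ≤ m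
    have fwd : (∃ e : Nat, e ≤ l.length ∧
        (List.replicate e 'a' ++ l) = (List.replicate e 'a' ++ l).reverse) →
        (mid = mid.reverse ∧ k ≤ m) := by
      rintro ⟨e, _, hpal⟩
      rw [hTrev e, hT e] at hpal
      have htw1 : (List.replicate (e + k) 'a' ++ mid ++ List.replicate m 'a').takeWhile p
          = List.replicate (e + k) 'a' := by
        rw [List.append_assoc]
        refine takeWhile_rep_append (e + k) (mid ++ List.replicate m 'a') ?_
        rw [List.takeWhile_append, if_neg (by
          rw [hmtw]
          intro hlen
          exact hmidne (List.eq_nil_of_length_eq_zero (by simpa using hlen.symm))), hmtw]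
      have htw2 : (List.replicate m 'a' ++ mid.reverse ++ List.replicate (e + k) 'a').takeWhile p
          = List.replicate m 'a' := by
        rw [List.append_assoc]
        refine takeWhile_rep_append m (mid.reverse ++ List.replicate (e + k) 'a') ?_
        rw [List.takeWhile_append, if_neg (by
          rw [hmrtw]
          intro hlen
          exact hmrne (List.eq_nil_of_length_eq_zero (by simpa using hlen.symm))), hmrtw]
      have hlen : e + k = m := by
        have := congrArg (fun x => (x.takeWhile p).length) hpal
        simp only [htw1, htw2, List.length_replicate] at this
        exact this
      have hmidpal : mid = mid.reverse := by
        rw [hlen, List.append_assoc, List.append_assoc] at hpal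
        have h1 := List.append_cancel_left hpal
        exact (List.append_left_inj _).1 h1
      exact ⟨hmidpal, by omega⟩
    -- backward: mid palindrome and k ≤ m → pad m - k works
    have bwd : (mid = mid.reverse ∧ k ≤ m) →
        (∃ e : Nat, e ≤ l.length ∧
          (List.replicate e 'a' ++ l) = (List.replicate e 'a' ++ l).reverse) := by
      rintro ⟨hmidpal, hkm⟩
      refine ⟨m - k, by omega, ?_⟩
      rw [hTrev (m - k), hT (m - k)]
      have : m - k + k = m := by omega
      rw [this, ← hmidpal]
    apply Bool.eq_iff_iff.2
    rw [hexists]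
    constructor
    · intro h
      rcases fwd h with ⟨h1, h2⟩
      have hb : (mid == mid.reverse) = true := beq_iff_eq.2 h1
      simp [hb, h2]
    · intro h
      simp only [Bool.and_eq_true, beq_iff_eq, decide_eq_true_eq] at h
      exact bwd h

-- ===== VERDICT (by name: the statement is the Claim_ definition above) =====
theorem is_padable_to_palindrome_spec : Claim_equal_is_padable_to_palindrome := by
  intro s _
  unfold Spec_is_padable_to_palindrome
  rw [charA s, charB s]
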